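-- pv_equiv track=rewrite | github.com/Farshid-Ahmadi/firestationbalebot | helper.py | _split_history_entries
-- ===== SOURCE A (Python) =====
-- def _split_history_entries(content:str):
--     """
--     Split DictionaryLogger logs using line separator "----------".
--     Returns non-empty entries.
--     """
--     entries = []
--     current = []
--     for line in content.splitlines():
--         if line.strip() == "----------":
--             entry = "\n".join(current).strip()
--             if entry:
--                 entries.append(entry)
--             current = []
--             continue
--         current.append(line)
--
--     entry = "\n".join(current).strip()
--     if entry:
--         entries.append(entry)
--     return entries
-- ===== SOURCE B (Python) =====
-- def _split_history_entries(content:str):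
--     """
--     Split DictionaryLogger logs using line separator "----------".
--     Returns non-empty entries.
--     """
--     def chunks(lines):
--         for i, line in enumerate(lines):
--             if line.strip() == "----------":
--                 return [lines[:i]] + chunks(lines[i + 1:])
--         return [lines]
--     return [e for e in ("\n".join(c).strip() for c in chunks(content.splitlines())) if e]
-- ===== Notes on version B (the rewrite author's own statement) =====
-- stated objective: alternative
-- what changed: Replaces A's single-pass loop with a mutable current-buffer, sentinel reset and post-loop flush by a recursive divide-and-conquer: chunks() slices the line list at the first separator found and recurses on the remainder, and a separate comprehension pass joins/strips each chunk and keeps the non-empty ones.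
import Mathlib
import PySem

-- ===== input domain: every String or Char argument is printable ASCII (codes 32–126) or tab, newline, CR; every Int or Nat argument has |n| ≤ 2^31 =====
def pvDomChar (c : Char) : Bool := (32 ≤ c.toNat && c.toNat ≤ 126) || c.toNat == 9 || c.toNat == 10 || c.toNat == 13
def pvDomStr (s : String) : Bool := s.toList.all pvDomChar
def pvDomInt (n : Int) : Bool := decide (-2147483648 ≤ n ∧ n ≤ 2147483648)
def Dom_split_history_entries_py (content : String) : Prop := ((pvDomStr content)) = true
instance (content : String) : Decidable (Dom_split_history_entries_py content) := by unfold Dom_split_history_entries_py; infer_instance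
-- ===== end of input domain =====

-- B replaces A's single-pass current-buffer loop (with sentinel reset and post-loop flush) by a
-- recursive divide at the first separator line plus a staged emit pass (alternative decomposition);
-- same return value on all inputs.

-- ===== PORT A =====
-- A's loop state: (entries, current); final flush after the loop.
def pvStepA (st : List String × List String) (line : String) : List String × List String :=
  if PySem.Str.strip line = "----------" then
    let entry := PySem.Str.strip (PySem.Str.join "\n" st.2)
    (if entry = "" then st.1 else st.1 ++ [entry], [])
  else
    (st.1, st.2 ++ [line])

def split_history_entries_py (content : String) : List String :=
  let st := (PySem.Str.splitlines content).foldl pvStepA ([], [])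
  let entry := PySem.Str.strip (PySem.Str.join "\n" st.2)
  if entry = "" then st.1 else st.1 ++ [entry]

-- ===== PORT B =====
-- Source B's 'chunks': scan for the first separator line (the for/enumerate loop = findIdx?);
-- if found at i, return lines[:i] consed onto the recursion on lines[i+1:]; else [lines].
def pvChunks (lines : List String) : List (List String) :=
  match h : lines.findIdx? (fun l => PySem.Str.strip l = "----------") with
  | some i => lines.take i :: pvChunks (lines.drop (i + 1))
  | none => [lines]
termination_by lines.length
decreasing_by
  have hi : i < lines.length :=
    (List.findIdx?_eq_some_iff_findIdx_eq.mp h).1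
  simp [List.length_drop]; omega

-- Source B's comprehension body: '\n'.join(c).strip(), kept if non-empty.
def pvEmit (seg : List String) : Option String :=
  let entry := PySem.Str.strip (PySem.Str.join "\n" seg)
  if entry = "" then none else some entry

def split_history_entries_py_alt (content : String) : List String :=
  (pvChunks (PySem.Str.splitlines content)).filterMap pvEmit

-- ===== PRECONDITION & SPEC =====
def Spec_split_history_entries_py (content : String) (out : List String) : Prop := out = split_history_entries_py_alt content
instance (content : String) (out : List String) : Decidable (Spec_split_history_entries_py content out) := by unfold Spec_split_history_entries_py; infer_instance

-- ===== CLAIM (what is proved, stated in full; the proofs are below) =====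
def Claim_equal_split_history_entries_py : Prop := ∀ (content : String), Dom_split_history_entries_py content → Spec_split_history_entries_py content (split_history_entries_py content)

-- ===== LEMMAS AND PROOFS =====

-- pvChunks never returns the empty list.
theorem pvChunks_ne_nil (lines : List String) : pvChunks lines ≠ [] := by
  unfold pvChunks
  split <;> simp

-- Cons-step characterisation of pvChunks.
theorem pvChunks_none (ls : List String)
    (h : ls.findIdx? (fun l => PySem.Str.strip l = "----------") = none) :
    pvChunks ls = [ls] := by
  rw [pvChunks]
  split
  · rename_i i h'
    rw [h'] at h; cases h
  · rfl

theorem pvChunks_some (ls : List String) (i : Nat)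
    (h : ls.findIdx? (fun l => PySem.Str.strip l = "----------") = some i) :
    pvChunks ls = ls.take i :: pvChunks (ls.drop (i + 1)) := by
  rw [pvChunks]
  split
  · rename_i j h'
    rw [h'] at h
    obtain rfl : j = i := Option.some.inj h
    rfl
  · rename_i h'
    rw [h'] at h; cases h

theorem pvChunks_cons (l : String) (ls : List String) :
    pvChunks (l :: ls) =
      if PySem.Str.strip l = "----------" then [] :: pvChunks ls
      else (pvChunks ls).modifyHead (l :: ·) := by
  by_cases hsep : PySem.Str.strip l = "----------"
  · rw [pvChunks_some (l :: ls) 0 (by simp [List.findIdx?_cons, hsep])]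
    simp [hsep]
  · rw [if_neg hsep]
    cases hls : ls.findIdx? (fun l => PySem.Str.strip l = "----------") with
    | none =>
      rw [pvChunks_none ls hls,
        pvChunks_none (l :: ls) (by simp [List.findIdx?_cons, hsep, hls])]
      rfl
    | some j =>
      rw [pvChunks_some ls j hls,
        pvChunks_some (l :: ls) (j + 1) (by simp [List.findIdx?_cons, hsep, hls])]
      simp [List.take_succ_cons, List.drop_succ_cons]

-- Flush A's final state, as done after A's loop.
def pvFlush (st : List String × List String) : List String :=
  let entry := PySem.Str.strip (PySem.Str.join "\n" st.2)
  if entry = "" then st.1 else st.1 ++ [entry]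

theorem pvFlush_eq (es cur : List String) :
    pvFlush (es, cur) = es ++ (pvEmit cur).toList := by
  simp only [pvFlush, pvEmit]
  split_ifs <;> simp

-- Loop invariant: A's state (es, cur) corresponds to B's chunks with cur prepended to the head chunk.
theorem pv_inv (lines : List String) :
    ∀ (es cur : List String),
    pvFlush (lines.foldl pvStepA (es, cur)) =
      es ++ ((pvChunks lines).modifyHead (cur ++ ·)).filterMap pvEmit := by
  induction lines with
  | nil =>
    intro es cur
    rw [pvChunks]
    simp only [List.findIdx?_nil, List.foldl_nil, pvFlush_eq, List.modifyHead,
      List.filterMap_cons, List.filterMap_nil, List.append_nil]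
    cases pvEmit cur <;> simp
  | cons l ls ih =>
    intro es cur
    rw [List.foldl_cons, pvChunks_cons]
    by_cases hsep : PySem.Str.strip l = "----------"
    · simp only [pvStepA, hsep, if_true]
      rw [ih]
      have : (if PySem.Str.strip (PySem.Str.join "\n" cur) = "" then es
          else es ++ [PySem.Str.strip (PySem.Str.join "\n" cur)]) = es ++ (pvEmit cur).toList := by
        simp only [pvEmit]; split_ifs <;> simp
      rw [this]
      obtain ⟨c, cs, hc⟩ := List.exists_cons_of_ne_nil (pvChunks_ne_nil ls)
      simp [hc, List.filterMap_cons]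
      cases pvEmit (cur) <;> cases pvEmit c <;> simp
    · simp only [pvStepA, hsep]
      rw [ih]
      obtain ⟨c, cs, hc⟩ := List.exists_cons_of_ne_nil (pvChunks_ne_nil ls)
      simp [hc]

-- ===== VERDICT (by name: the statement is the Claim_ definition above) =====
theorem split_history_entries_py_spec : Claim_equal_split_history_entries_py := by
  intro content _
  show split_history_entries_py content = split_history_entries_py_alt content
  have h := pv_inv (PySem.Str.splitlines content) [] []
  obtain ⟨c, cs, hc⟩ := List.exists_cons_of_ne_nil (pvChunks_ne_nil (PySem.Str.splitlines content))
  simpa [split_history_entries_py, split_history_entries_py_alt, pvFlush, hc] using h
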